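-- pv_equiv track=rewrite | github.com/deadman96385/py-git-split | git_split.py | _strip_binary_diff_sections
-- ===== SOURCE A (Python) =====
-- def _strip_binary_diff_sections(raw: str) -> tuple[str, int]:
--     """Remove binary-only file sections from a unified diff.
--
--     git apply cannot handle 'Binary files X and Y differ' entries without the
--     actual binary content (--binary flag on git show). Since those blobs already
--     exist in the object store (they're part of a committed revision), they can be
--     staged separately — we don't need to validate them via git apply.
--
--     Returns (stripped_diff, binary_file_count).
--     """
--     out: list[str] = []
--     section: list[str] = []
--     section_is_binary = False
--     binary_count = 0
--
--     for line in raw.splitlines(keepends=True):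
--         if line.startswith("diff --git "):
--             if section:
--                 if section_is_binary:
--                     binary_count += 1
--                 else:
--                     out.extend(section)
--             section = [line]
--             section_is_binary = False
--         else:
--             if line.startswith("Binary files ") or line.startswith("GIT binary patch"):
--                 section_is_binary = True
--             section.append(line)
--
--     if section:
--         if section_is_binary:
--             binary_count += 1
--         else:
--             out.extend(section)
--
--     return "".join(out), binary_count
-- ===== SOURCE B (Python) =====
-- def _strip_binary_diff_sections(raw: str) -> tuple[str, int]:
--     lines = raw.splitlines(keepends=True)
--     # phase 1: group into sections (preamble first, then one per header line)
--     sections: list[list[str]] = []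
--     current: list[str] = []
--     for line in lines:
--         if line.startswith("diff --git "):
--             sections.append(current)
--             current = [line]
--         else:
--             current.append(line)
--     sections.append(current)
--     # phase 2: keep non-binary sections, count binary ones
--     out: list[str] = []
--     count = 0
--     for sec in sections:
--         if any(l.startswith("Binary files ") or l.startswith("GIT binary patch") for l in sec):
--             count += 1
--         else:
--             out.extend(sec)
--     return "".join(out), count
-- ===== Notes on version B (the rewrite author's own statement) =====
-- stated objective: alternative
-- what changed: Replaced A's interleaved stream-and-flush loop (mutable section buffer, binary flag and two flush sites) by an explicit two-phase pipeline: first group the lines into sections at each git diff header line, then filter/count the sections whose lines contain a binary marker.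
import Mathlib
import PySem

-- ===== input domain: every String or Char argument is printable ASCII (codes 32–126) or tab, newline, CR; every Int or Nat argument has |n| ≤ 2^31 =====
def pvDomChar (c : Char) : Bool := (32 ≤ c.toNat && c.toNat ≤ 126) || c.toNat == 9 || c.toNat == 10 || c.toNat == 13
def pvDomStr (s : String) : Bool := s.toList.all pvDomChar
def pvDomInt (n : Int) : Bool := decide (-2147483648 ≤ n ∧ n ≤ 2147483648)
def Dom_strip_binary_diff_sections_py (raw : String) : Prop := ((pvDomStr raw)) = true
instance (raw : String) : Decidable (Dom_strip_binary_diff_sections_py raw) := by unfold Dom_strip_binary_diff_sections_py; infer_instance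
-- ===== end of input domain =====

-- B replaces A's interleaved stream-and-flush loop by an explicit two-phase group-then-filter
-- decomposition (split into sections first, then drop binary sections); same cost, plainer structure.

-- hand port of str.splitlines(keepends=True) (PySem has only the keepends=False form);
-- exact on Dom: the only line boundaries among tab/newline/CR/printable ASCII are \n, \r\n, \r
def pvSplitlinesKeep : List Char → List Char → List (List Char)
  | [], acc => if acc.isEmpty then [] else [acc.reverse]
  | '\r' :: '\n' :: rest, acc => (acc.reverse ++ ['\r', '\n']) :: pvSplitlinesKeep rest []
  | '\n' :: rest, acc => (acc.reverse ++ ['\n']) :: pvSplitlinesKeep rest []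
  | '\r' :: rest, acc => (acc.reverse ++ ['\r']) :: pvSplitlinesKeep rest []
  | c :: rest, acc => pvSplitlinesKeep rest (c :: acc)

def pvHdr : List Char := "diff --git ".toList
def pvIsBinLine (l : List Char) : Bool :=
  PySem.Chars.startswith l "Binary files ".toList || PySem.Chars.startswith l "GIT binary patch".toList

-- ===== PORT A =====
-- A's single loop: state (out, sect, section_is_binary, binary_count); base case is the trailing flush
def pvLoopA : List (List Char) → List (List Char) → List (List Char) → Bool → Int → List (List Char) × Int
  | [], out, sect, isBin, cnt =>
      if sect.isEmpty then (out, cnt)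
      else if isBin then (out, cnt + 1) else (out ++ sect, cnt)
  | line :: rest, out, sect, isBin, cnt =>
      if PySem.Chars.startswith line pvHdr then
        if sect.isEmpty then pvLoopA rest out [line] false cnt
        else if isBin then pvLoopA rest out [line] false (cnt + 1)
        else pvLoopA rest (out ++ sect) [line] false cnt
      else
        pvLoopA rest out (sect ++ [line]) (if pvIsBinLine line then true else isBin) cnt

def strip_binary_diff_sections_py (raw : String) : String × Int :=
  let r := pvLoopA (pvSplitlinesKeep raw.toList []) [] [] false 0
  (String.ofList (PySem.Chars.join [] r.1), r.2)

-- ===== PORT B =====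
-- phase 1: group the lines into sections (preamble first, then one sect per header line)
def pvSplitSections : List (List Char) → List (List Char) → List (List (List Char))
  | [], cur => [cur]
  | line :: rest, cur =>
      if PySem.Chars.startswith line pvHdr then cur :: pvSplitSections rest [line]
      else pvSplitSections rest (cur ++ [line])

def pvSecIsBin (sec : List (List Char)) : Bool := sec.any pvIsBinLine

-- phase 2: count binary sections, keep the rest
def pvFilterSections : List (List (List Char)) → List (List Char) → Int → List (List Char) × Int
  | [], out, cnt => (out, cnt)
  | sec :: rest, out, cnt =>
      if pvSecIsBin sec then pvFilterSections rest out (cnt + 1)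
      else pvFilterSections rest (out ++ sec) cnt

def strip_binary_diff_sections_py_alt (raw : String) : String × Int :=
  let r := pvFilterSections (pvSplitSections (pvSplitlinesKeep raw.toList []) []) [] 0
  (String.ofList (PySem.Chars.join [] r.1), r.2)

-- ===== PRECONDITION & SPEC =====
def Spec_strip_binary_diff_sections_py (raw : String) (out : String × Int) : Prop := out = strip_binary_diff_sections_py_alt raw
instance (raw : String) (out : String × Int) : Decidable (Spec_strip_binary_diff_sections_py raw out) := by unfold Spec_strip_binary_diff_sections_py; infer_instance

-- ===== CLAIM (what is proved, stated in full; the proofs are below) =====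
def Claim_equal_strip_binary_diff_sections_py : Prop := ∀ (raw : String), Dom_strip_binary_diff_sections_py raw → Spec_strip_binary_diff_sections_py raw (strip_binary_diff_sections_py raw)

-- ===== LEMMAS AND PROOFS =====

-- a header line never carries a binary marker (first characters differ)
theorem pv_hdr_not_bin (l : List Char) (h : PySem.Chars.startswith l pvHdr = true) :
    pvIsBinLine l = false := by
  rw [PySem.Chars.startswith_iff] at h
  obtain ⟨t, ht⟩ := h
  subst ht
  simp [pvIsBinLine, pvHdr]
  constructor <;>
  · rw [Bool.eq_false_iff]
    intro hb
    rw [PySem.Chars.startswith_iff] at hb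
    obtain ⟨u, hu⟩ := hb
    simp [pvHdr] at hu

-- the invariant: A's flag is exactly "some line of the current sect is a binary marker"
theorem pv_main (rest : List (List Char)) : ∀ (cur out : List (List Char)) (cnt : Int),
    pvFilterSections (pvSplitSections rest cur) out cnt
      = pvLoopA rest out cur (cur.any pvIsBinLine) cnt := by
  induction rest with
  | nil =>
      intro cur out cnt
      cases cur with
      | nil => simp [pvSplitSections, pvFilterSections, pvLoopA, pvSecIsBin]
      | cons c cs =>
          simp only [pvSplitSections, pvFilterSections, pvLoopA, pvSecIsBin, List.isEmpty_cons]
          split_ifs <;> simp_all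
  | cons line rest ih =>
      intro cur out cnt
      simp only [pvSplitSections, pvLoopA]
      by_cases hh : PySem.Chars.startswith line pvHdr = true
      · simp only [hh, if_true]
        have hnb : pvIsBinLine line = false := pv_hdr_not_bin line hh
        cases cur with
        | nil =>
            simp only [pvFilterSections, pvSecIsBin, List.any_nil, if_false,
              Bool.false_eq_true]
            rw [ih]
            simp [hnb]
        | cons c cs =>
            simp only [pvFilterSections, pvSecIsBin, List.isEmpty_cons, Bool.false_eq_true,
              if_false]
            split_ifs with hb <;> rw [ih] <;> simp [hnb]
      · simp only [hh, if_false, Bool.false_eq_true]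
        rw [ih]
        have : (cur ++ [line]).any pvIsBinLine = (if pvIsBinLine line = true then true else cur.any pvIsBinLine) := by
          cases h : pvIsBinLine line <;> simp [h]
        rw [this]

-- ===== VERDICT (by name: the statement is the Claim_ definition above) =====
theorem strip_binary_diff_sections_py_spec : Claim_equal_strip_binary_diff_sections_py := by
  intro raw _
  unfold Spec_strip_binary_diff_sections_py strip_binary_diff_sections_py strip_binary_diff_sections_py_alt
  rw [pv_main]
  simp
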